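-- pv_equiv track=rewrite | github.com/kldtz/CharSplit | kirke/abbyyxml/abbyypbox_tablesync.py | se_list_to_span_list
-- ===== SOURCE A (Python) =====
-- from typing import Dict, List, Match, Optional, TextIO, Tuple
--
-- def se_list_to_span_list(se_list: List[Tuple[int, int]],
--                                        doc_text: str) \
--                          -> List[Tuple[int, int]]:
--     if not se_list:
--         return se_list
--     se_list.sort()
--     prev_start, prev_end = se_list[0]
--     span_list = []  # type: List[Tuple[int, int]]
--     for start, end in se_list[1:]:
--         between_text = doc_text[prev_end:start]
--         if between_text.isspace():
--             prev_end = end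
--         else:
--             span_list.append((prev_start, prev_end))
--             prev_start, prev_end = start, end
--     span_list.append((prev_start, prev_end))
--
--     return span_list
-- ===== SOURCE B (Python) =====
-- # B: boundary-table decomposition — sort, collect the adjacent pairs whose gap is
-- # not pure whitespace (the cuts), then zip run starts with run ends; no running
-- # prev_start/prev_end state. Like A, sorts se_list in place (return value equivalence).
-- def se_list_to_span_list(se_list, doc_text):
--     if not se_list:
--         return se_list
--     se_list.sort()
--     pairs = list(zip(se_list, se_list[1:]))
--     cuts = [pq for pq in pairs if not doc_text[pq[0][1]:pq[1][0]].isspace()]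
--     starts = [se_list[0][0]] + [q[0] for _, q in cuts]
--     ends = [p[1] for p, _ in cuts] + [se_list[-1][1]]
--     return list(zip(starts, ends))
-- ===== Notes on version B (the rewrite author's own statement) =====
-- stated objective: alternative
-- what changed: Instead of a single fold carrying running prev_start/prev_end state and appending spans, B sorts, builds a boundary table (the adjacent pairs whose gap is not pure whitespace) in one pass, then forms the result by zipping run starts with run ends.
import Mathlib
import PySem

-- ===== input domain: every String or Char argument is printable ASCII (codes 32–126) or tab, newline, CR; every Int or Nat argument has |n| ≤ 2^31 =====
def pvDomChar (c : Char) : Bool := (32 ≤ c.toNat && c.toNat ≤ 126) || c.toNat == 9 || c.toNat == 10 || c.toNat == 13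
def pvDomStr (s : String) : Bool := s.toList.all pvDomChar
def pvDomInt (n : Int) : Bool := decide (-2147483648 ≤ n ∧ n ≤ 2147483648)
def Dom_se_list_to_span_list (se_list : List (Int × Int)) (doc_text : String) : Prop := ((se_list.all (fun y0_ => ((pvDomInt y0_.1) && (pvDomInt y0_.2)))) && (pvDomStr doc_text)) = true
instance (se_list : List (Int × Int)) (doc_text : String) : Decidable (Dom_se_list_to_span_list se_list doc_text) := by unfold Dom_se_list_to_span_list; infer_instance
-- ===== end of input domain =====

-- B replaces A's running prev_start/prev_end fold by a boundary table: it collects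
-- the adjacent pairs whose gap is not whitespace and zips run starts with run ends
-- (objective: alternative decomposition). Both sort se_list in place; the
-- equivalence proved is about the return value.


-- ===== PORT A =====
def se_list_to_span_list (se_list : List (Int × Int)) (doc_text : String) : List (Int × Int) :=
  if se_list = [] then se_list
  else
    let s := PySem.List.sorted2 se_list (fun x => x.1) (fun x => x.2) false
    let ps := (PySem.List.pyGetD s 0 ((0:Int), (0:Int))).1
    let pe := (PySem.List.pyGetD s 0 ((0:Int), (0:Int))).2
    let st := (PySem.List.slice s (some 1) none).foldl
      (fun (acc : List (Int × Int) × Int × Int) se =>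
        if PySem.Str.strIsspace (PySem.Str.slice doc_text (some acc.2.2) (some se.1)) then
          (acc.1, acc.2.1, se.2)
        else
          (acc.1 ++ [(acc.2.1, acc.2.2)], se.1, se.2))
      ([], ps, pe)
    st.1 ++ [(st.2.1, st.2.2)]

-- ===== PORT B =====
def se_list_to_span_list_alt (se_list : List (Int × Int)) (doc_text : String) : List (Int × Int) :=
  if se_list = [] then se_list
  else
    let s := PySem.List.sorted2 se_list (fun x => x.1) (fun x => x.2) false
    let pairs := s.zip (PySem.List.slice s (some 1) none)
    let cuts := pairs.filter
      (fun pq => !(PySem.Str.strIsspace (PySem.Str.slice doc_text (some pq.1.2) (some pq.2.1))))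
    let starts := (PySem.List.pyGetD s 0 ((0:Int), (0:Int))).1 :: cuts.map (fun pq => pq.2.1)
    let ends := cuts.map (fun pq => pq.1.2) ++ [(PySem.List.pyGetD s (-1) ((0:Int), (0:Int))).2]
    starts.zip ends

-- ===== PRECONDITION & SPEC =====
def Spec_se_list_to_span_list (se_list : List (Int × Int)) (doc_text : String) (out : List (Int × Int)) : Prop := out = se_list_to_span_list_alt se_list doc_text
instance (se_list : List (Int × Int)) (doc_text : String) (out : List (Int × Int)) : Decidable (Spec_se_list_to_span_list se_list doc_text out) := by unfold Spec_se_list_to_span_list; infer_instance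

-- ===== CLAIM (what is proved, stated in full; the proofs are below) =====
def Claim_equal_se_list_to_span_list : Prop := ∀ (se_list : List (Int × Int)) (doc_text : String), Dom_se_list_to_span_list se_list doc_text → Spec_se_list_to_span_list se_list doc_text (se_list_to_span_list se_list doc_text)

-- ===== LEMMAS AND PROOFS =====

-- Reference recursion: the merged spans of (ps,pe) followed by the remaining sorted pairs.
def mergeRef (t : String) (ps pe : Int) : List (Int × Int) → List (Int × Int)
  | [] => [(ps, pe)]
  | (s1, e1) :: tail =>
    if PySem.Str.strIsspace (PySem.Str.slice t (some pe) (some s1)) then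
      mergeRef t ps e1 tail
    else (ps, pe) :: mergeRef t s1 e1 tail

-- A's fold equals the reference recursion (accumulator generalized).
theorem foldA_eq_mergeRef (t : String) (xs : List (Int × Int)) :
    ∀ (acc : List (Int × Int)) (ps pe : Int),
      (let st := xs.foldl
        (fun (acc : List (Int × Int) × Int × Int) se =>
          if PySem.Str.strIsspace (PySem.Str.slice t (some acc.2.2) (some se.1)) then
            (acc.1, acc.2.1, se.2)
          else
            (acc.1 ++ [(acc.2.1, acc.2.2)], se.1, se.2))
        (acc, ps, pe)
       st.1 ++ [(st.2.1, st.2.2)]) = acc ++ mergeRef t ps pe xs := by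
  induction xs with
  | nil => intro acc ps pe; simp [mergeRef]
  | cons hd tl ih =>
    intro acc ps pe
    obtain ⟨s1, e1⟩ := hd
    by_cases h : PySem.Str.strIsspace (PySem.Str.slice t (some pe) (some s1)) = true
    · simp only [List.foldl_cons, h, if_pos, mergeRef]
      exact ih acc ps e1
    · simp only [Bool.not_eq_true] at h
      simp only [List.foldl_cons, mergeRef, h, Bool.false_eq_true, if_false]
      rw [ih (acc ++ [(ps, pe)]) s1 e1]
      simp

-- B's zip-of-cuts construction equals the reference recursion; the head start is
-- generalized to `a` (it is overridden when a previous run absorbs the head).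
theorem zipB_eq_mergeRef (t : String) (xs : List (Int × Int)) :
    ∀ (a p e : Int),
      (let cuts := (((p, e) :: xs).zip xs).filter
        (fun pq => !(PySem.Str.strIsspace (PySem.Str.slice t (some pq.1.2) (some pq.2.1))))
       (a :: cuts.map (fun pq => pq.2.1)).zip
         (cuts.map (fun pq => pq.1.2) ++ [(PySem.List.pyGetD ((p, e) :: xs) (-1) ((0:Int), (0:Int))).2]))
      = mergeRef t a e xs := by
  induction xs with
  | nil =>
    intro a p e
    rw [show (PySem.List.pyGetD [(p, e)] (-1) ((0:Int), (0:Int))) = (p, e) from by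
      rw [PySem.List.pyGetD_neg_one _ _ (by simp)]; simp]
    simp [mergeRef]
  | cons hd tl ih =>
    intro a p e
    obtain ⟨s1, e1⟩ := hd
    have hlast : PySem.List.pyGetD ((p, e) :: (s1, e1) :: tl) (-1) ((0:Int), (0:Int))
        = PySem.List.pyGetD ((s1, e1) :: tl) (-1) ((0:Int), (0:Int)) := by
      rw [PySem.List.pyGetD_neg_one _ _ (by simp), PySem.List.pyGetD_neg_one _ _ (by simp)]
      exact List.getLast_cons _
    by_cases h : PySem.Str.strIsspace (PySem.Str.slice t (some e) (some s1)) = true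
    · simp only [List.zip_cons_cons, List.filter_cons, h, Bool.not_true, Bool.false_eq_true,
        if_false, mergeRef, if_pos, hlast]
      exact ih a s1 e1
    · simp only [Bool.not_eq_true] at h
      simp only [List.zip_cons_cons, List.filter_cons, h, Bool.not_false, if_pos, mergeRef,
        Bool.false_eq_true, if_false, hlast, List.map_cons, List.cons_append, List.zip_cons_cons]
      rw [← ih s1 s1 e1]

theorem sorted2_ne_nil {se_list : List (Int × Int)} (h : se_list ≠ []) :
    PySem.List.sorted2 se_list (fun x => x.1) (fun x => x.2) false ≠ [] := by
  intro hnil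
  have hp := PySem.List.sorted2_perm se_list (fun x => x.1) (fun x => x.2) false
  rw [hnil] at hp
  exact h (hp.symm.eq_nil)

-- ===== VERDICT (by name: the statement is the Claim_ definition above) =====
theorem se_list_to_span_list_spec : Claim_equal_se_list_to_span_list := by
  intro se_list doc_text _
  unfold Spec_se_list_to_span_list se_list_to_span_list se_list_to_span_list_alt
  by_cases hse : se_list = []
  · simp [hse]
  · simp only [hse, if_false]
    obtain ⟨⟨p, e⟩, xs, hs⟩ := List.exists_cons_of_ne_nil (sorted2_ne_nil hse)
    rw [hs]
    simp only [PySem.List.slice_from_one, List.tail_cons, PySem.List.pyGetD_zero_cons]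
    rw [foldA_eq_mergeRef doc_text xs [] p e, zipB_eq_mergeRef doc_text xs p p e]
    simp
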